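-- pv_equiv track=rewrite | github.com/LucasMayer02/UFCG_Exercicios | atividades/esteira_em_uma_linha_de_producao_de_uma_fabrica/questao.py | verifica_esteira
-- ===== SOURCE A (Python) =====
-- def verifica_esteira(l1, l2) :
--     posicao = []
--     ordem = True
--     for i in range(len(l2)) :
--         possui = False
--         for j in range(len(l1)) :
--             if l2[i] == l1[j] :
--                 posicao.append(j)
--                 possui = True
--         if not possui :
--             return False
--     for i in range(1, len(posicao)) :
--         if posicao[i-1] > posicao[i] :
--             ordem = False
--     if ordem :
--         return True
--     else :
--         return False
-- ===== SOURCE B (Python) =====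
-- def verifica_esteira(l1, l2):
--     # one pass over l1: value -> (first index, last index)
--     bounds = {}
--     for j, v in enumerate(l1):
--         if v in bounds:
--             bounds[v] = (bounds[v][0], j)
--         else:
--             bounds[v] = (j, j)
--     prev_max = None
--     for v in l2:
--         if v not in bounds:
--             return False
--         lo, hi = bounds[v]
--         if prev_max is not None and prev_max > lo:
--             return False
--         prev_max = hi
--     return True
-- ===== Notes on version B (the rewrite author's own statement) =====
-- stated objective: faster
-- what changed: Replaces the rescans of l1 per l2 element plus a full ordering pass over all collected positions by a single dict pass over l1 recording each value's first/last index, then one boundary scan over l2 (last index of previous value <= first index of next).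
import Mathlib
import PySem

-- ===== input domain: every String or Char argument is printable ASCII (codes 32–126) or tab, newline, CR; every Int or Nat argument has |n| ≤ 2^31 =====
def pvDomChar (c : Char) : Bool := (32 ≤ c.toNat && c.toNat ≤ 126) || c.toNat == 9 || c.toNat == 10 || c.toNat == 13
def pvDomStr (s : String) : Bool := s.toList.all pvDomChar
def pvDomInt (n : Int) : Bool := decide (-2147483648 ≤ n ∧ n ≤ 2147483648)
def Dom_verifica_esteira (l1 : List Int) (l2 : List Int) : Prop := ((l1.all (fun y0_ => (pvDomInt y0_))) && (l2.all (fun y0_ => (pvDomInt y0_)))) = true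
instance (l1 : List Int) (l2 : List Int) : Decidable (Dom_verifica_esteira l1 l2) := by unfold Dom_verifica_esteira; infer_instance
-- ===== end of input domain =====

-- B replaces A's per-element rescans of l1 and the global ordering pass by one dict pass
-- over l1 (value -> first/last index) and one boundary scan over l2 (objective: faster).

-- ===== PORT A =====
-- inner 'for j in range(len(l1)): if l2[i] == l1[j]: posicao.append(j)'
def pvInnerA (l1 : List Int) (v : Int) : List Nat :=
  (List.range l1.length).foldl (fun acc j => if v == l1.getD j 0 then acc ++ [j] else acc) []

-- outer loop over l2 with the early 'return False' when possui stays False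
def pvLoopA (l1 : List Int) (l2 : List Int) (posicao : List Nat) : Option (List Nat) :=
  match l2 with
  | [] => some posicao
  | v :: rest =>
      let ps := pvInnerA l1 v
      if ps.isEmpty then none else pvLoopA l1 rest (posicao ++ ps)

-- 'for i in range(1, len(posicao)): if posicao[i-1] > posicao[i]: ordem = False'
def pvOrdemA (p : List Nat) : Bool :=
  ((List.range p.length).drop 1).foldl
    (fun ordem i => if p.getD (i - 1) 0 > p.getD i 0 then false else ordem) true

def verifica_esteira (l1 : List Int) (l2 : List Int) : Bool :=
  match pvLoopA l1 l2 [] with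
  | none => false
  | some p => if pvOrdemA p then true else false

-- ===== PORT B =====
-- loop body of 'for j, v in enumerate(l1): bounds[v] = (bounds[v][0], j) if v in bounds else (j, j)'
def pvStep (d : PySem.Dict Int (Nat × Nat)) (vj : Int × Nat) : PySem.Dict Int (Nat × Nat) :=
  match d.get? vj.1 with
  | some lohi => d.insert vj.1 (lohi.1, vj.2)
  | none => d.insert vj.1 (vj.2, vj.2)

def pvBounds (l1 : List Int) : PySem.Dict Int (Nat × Nat) :=
  l1.zipIdx.foldl pvStep PySem.Dict.empty

-- scan over l2 carrying prev_max
def pvScanB (d : PySem.Dict Int (Nat × Nat)) (l2 : List Int) (pm : Option Nat) : Bool :=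
  match l2 with
  | [] => true
  | v :: rest =>
      match d.get? v with
      | none => false
      | some lohi =>
          match pm with
          | some a => if a > lohi.1 then false else pvScanB d rest (some lohi.2)
          | none => pvScanB d rest (some lohi.2)

def verifica_esteira_alt (l1 : List Int) (l2 : List Int) : Bool :=
  pvScanB (pvBounds l1) l2 none

-- ===== PRECONDITION & SPEC =====
def Spec_verifica_esteira (l1 : List Int) (l2 : List Int) (out : Bool) : Prop := out = verifica_esteira_alt l1 l2
instance (l1 : List Int) (l2 : List Int) (out : Bool) : Decidable (Spec_verifica_esteira l1 l2 out) := by unfold Spec_verifica_esteira; infer_instance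

-- ===== CLAIM (what is proved, stated in full; the proofs are below) =====
def Claim_equal_verifica_esteira : Prop := ∀ (l1 : List Int) (l2 : List Int), Dom_verifica_esteira l1 l2 → Spec_verifica_esteira l1 l2 (verifica_esteira l1 l2)

-- ===== LEMMAS AND PROOFS =====

-- the list of indices of v in l1, in increasing order
def pvIdxs (l1 : List Int) (v : Int) : List Nat :=
  (List.range l1.length).filter (fun j => v == l1.getD j 0)

-- spec of a bounds-dict entry in terms of pvIdxs
def pvBoundsSpec (js : List Nat) : Option (Nat × Nat) :=
  match js with
  | [] => none
  | a :: t => some (a, t.getLastD a)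

theorem pvFoldlFilter (p : Nat → Bool) (L : List Nat) (acc : List Nat) :
    L.foldl (fun a j => if p j then a ++ [j] else a) acc = acc ++ L.filter p := by
  induction L generalizing acc with
  | nil => simp
  | cons x L ih => cases h : p x <;> simp [h, ih]

theorem pvInnerA_eq (l1 : List Int) (v : Int) : pvInnerA l1 v = pvIdxs l1 v := by
  unfold pvInnerA pvIdxs
  rw [pvFoldlFilter, List.nil_append]

theorem pvIdxs_chain (l1 : List Int) (v : Int) : List.IsChain (· ≤ ·) (pvIdxs l1 v) := by
  rw [List.isChain_iff_pairwise]
  exact (List.pairwise_lt_range.filter _).imp le_of_lt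

theorem pvLoopA_eq (l1 : List Int) (l2 : List Int) (acc : List Nat) :
    pvLoopA l1 l2 acc =
      if l2.all (fun v => !(pvIdxs l1 v).isEmpty)
      then some (acc ++ l2.flatMap (pvIdxs l1)) else none := by
  induction l2 generalizing acc with
  | nil => simp [pvLoopA]
  | cons v rest ih =>
    simp only [pvLoopA, pvInnerA_eq, List.all_cons, List.flatMap_cons]
    cases h : (pvIdxs l1 v).isEmpty with
    | true => simp [h]
    | false => simp [h, ih, List.append_assoc]

theorem pvFoldlFalse (C : Nat → Prop) [DecidablePred C] (L : List Nat) (b : Bool) :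
    L.foldl (fun o i => if C i then false else o) b = (b && L.all (fun i => !decide (C i))) := by
  induction L generalizing b with
  | nil => simp
  | cons x L ih =>
    simp only [List.foldl_cons, List.all_cons, ih]
    by_cases hx : C x <;> cases b <;> simp [hx]

theorem pvMemDropRange (n i : Nat) : i ∈ (List.range n).drop 1 ↔ 1 ≤ i ∧ i < n := by
  cases n with
  | zero => simp
  | succ m =>
    rw [List.range_succ_eq_map]
    simp only [List.drop_succ_cons, List.drop_zero, List.mem_map, List.mem_range]
    constructor
    · rintro ⟨j, hj, rfl⟩; omega
    · rintro ⟨h1, h2⟩; exact ⟨i - 1, by omega, by omega⟩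

theorem pvOrdemA_iff (p : List Nat) : pvOrdemA p = true ↔ List.IsChain (· ≤ ·) p := by
  unfold pvOrdemA
  rw [pvFoldlFalse, List.isChain_iff_getElem]
  simp only [Bool.true_and, List.all_eq_true]
  constructor
  · intro hall i hi
    have h' := hall (i + 1) ((pvMemDropRange _ _).mpr ⟨by omega, by omega⟩)
    have h2 : ¬ (p.getD (i + 1 - 1) 0 > p.getD (i + 1) 0) := by simpa using h'
    simp only [Nat.add_sub_cancel] at h2
    rw [List.getD_eq_getElem _ _ (by omega), List.getD_eq_getElem _ _ (by omega)] at h2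
    omega
  · intro h i hi
    rw [pvMemDropRange] at hi
    obtain ⟨h1, h2⟩ := hi
    have h' := h (i - 1) (by omega)
    have hix : i - 1 + 1 = i := by omega
    simp only [hix] at h'
    simp only [Bool.not_eq_eq_eq_not, Bool.not_true, decide_eq_false_iff_not, gt_iff_lt, not_lt]
    rw [List.getD_eq_getElem _ _ (by omega), List.getD_eq_getElem _ _ (by omega)]
    exact h'

theorem pvGetLast?_cons (x : Nat) (l : List Nat) :
    (x :: l).getLast? = some (l.getLastD x) := by
  induction l generalizing x with
  | nil => rfl
  | cons y l ih => rw [List.getLast?_cons_cons, ih, List.getLastD_cons]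

theorem pvGetLastD_concat (l : List Nat) (n a : Nat) :
    (l ++ [n]).getLastD a = n := by
  induction l generalizing a with
  | nil => rfl
  | cons y l ih => rw [List.cons_append, List.getLastD_cons, ih]

theorem pvZipIdx_append_singleton (l : List Int) (x : Int) (n : Nat) :
    (l ++ [x]).zipIdx n = l.zipIdx n ++ [(x, n + l.length)] := by
  induction l generalizing n with
  | nil => simp [List.zipIdx]
  | cons y l ih =>
    simp only [List.cons_append, List.zipIdx_cons, ih, List.length_cons]
    simp [Nat.add_assoc, Nat.add_comm 1]

theorem pvIdxs_append (l : List Int) (x v : Int) :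
    pvIdxs (l ++ [x]) v = pvIdxs l v ++ (if v == x then [l.length] else []) := by
  unfold pvIdxs
  rw [show (l ++ [x]).length = l.length + 1 by simp, List.range_succ, List.filter_append]
  congr 1
  · apply List.filter_congr
    intro j hj
    rw [List.mem_range] at hj
    rw [List.getD_append _ _ _ _ hj]
  · simp only [List.filter_cons, List.filter_nil]
    rw [List.getD_append_right _ _ _ _ (le_refl _), Nat.sub_self]
    rfl

theorem pvBounds_append (l : List Int) (x : Int) :
    pvBounds (l ++ [x]) = pvStep (pvBounds l) (x, l.length) := by
  unfold pvBounds
  rw [pvZipIdx_append_singleton, List.foldl_append]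
  simp

theorem pvBounds_get? (l1 : List Int) (v : Int) :
    (pvBounds l1).get? v = pvBoundsSpec (pvIdxs l1 v) := by
  induction l1 using List.reverseRecOn generalizing v with
  | nil => simp [pvBounds, pvIdxs, pvBoundsSpec, List.zipIdx]
  | append_singleton l x ih =>
    rw [pvBounds_append, pvIdxs_append]
    unfold pvStep
    by_cases hvx : v = x
    · subst hvx
      simp only [BEq.rfl, if_true]
      rw [ih v]
      cases hidx : pvIdxs l v with
      | nil =>
        simp only [pvBoundsSpec, List.nil_append]
        rw [PySem.Dict.get?_insert]
        simp [pvBoundsSpec]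
      | cons a t =>
        simp only [pvBoundsSpec, List.cons_append]
        rw [PySem.Dict.get?_insert, pvGetLastD_concat]
        simp [pvBoundsSpec]
    · have hbeq : (v == x) = false := by simp [hvx]
      simp only [hbeq, if_false, List.append_nil]
      cases hgx : (pvBounds l).get? x with
      | none => rw [PySem.Dict.get?_insert]; simp [hvx]; exact ih v
      | some lohi => rw [PySem.Dict.get?_insert]; simp [hvx]; exact ih v

theorem pvChainShift (a : Nat) (t flat : List Nat)
    (hc : List.IsChain (· ≤ ·) (a :: t)) :
    List.IsChain (· ≤ ·) ((a :: t) ++ flat) ↔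
      List.IsChain (· ≤ ·) (t.getLastD a :: flat) := by
  rw [List.isChain_append, pvGetLast?_cons]
  constructor
  · rintro ⟨-, hf, hb⟩
    exact List.isChain_cons.mpr ⟨fun y hy => hb _ (by simp) y hy, hf⟩
  · intro h
    obtain ⟨hb, hf⟩ := List.isChain_cons.mp h
    refine ⟨hc, hf, fun z hz y hy => ?_⟩
    simp only [Option.mem_def, Option.some.injEq] at hz
    subst hz
    exact hb y hy

theorem pvScanB_iff (l1 : List Int) (l2 : List Int) (pm : Option Nat) :
    pvScanB (pvBounds l1) l2 pm = true ↔
      ((∀ v ∈ l2, pvIdxs l1 v ≠ []) ∧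
        List.IsChain (· ≤ ·) (pm.toList ++ l2.flatMap (pvIdxs l1))) := by
  induction l2 generalizing pm with
  | nil =>
    simp only [pvScanB, List.flatMap_nil, List.append_nil, List.not_mem_nil]
    cases pm <;> simp [List.isChain_nil, List.isChain_singleton, Option.toList]
  | cons v rest ih =>
    simp only [pvScanB, pvBounds_get?]
    rcases hidx : pvIdxs l1 v with _ | ⟨a, t⟩
    · simp only [pvBoundsSpec]
      exact iff_of_false (by simp) (fun h => h.1 v List.mem_cons_self hidx)
    · simp only [pvBoundsSpec]
      have hch : List.IsChain (· ≤ ·) (a :: t) := by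
        have := pvIdxs_chain l1 v; rwa [hidx] at this
      have hpres : (∀ w ∈ v :: rest, pvIdxs l1 w ≠ []) ↔ (∀ w ∈ rest, pvIdxs l1 w ≠ []) := by
        constructor
        · intro h w hw; exact h w (List.mem_cons_of_mem _ hw)
        · intro h w hw
          rcases List.mem_cons.mp hw with rfl | hw'
          · rw [hidx]; simp
          · exact h w hw'
      cases pm with
      | none =>
        rw [ih (some (t.getLastD a))]
        simp only [Option.toList, List.flatMap_cons, hidx, List.nil_append,
          List.singleton_append]
        rw [hpres, pvChainShift a t _ hch]
      | some pmv =>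
        by_cases hgt : pmv > a
        · simp only [if_pos hgt]
          refine iff_of_false (by simp) ?_
          rintro ⟨-, hchain⟩
          simp only [Option.toList, List.flatMap_cons, hidx, List.singleton_append,
            List.nil_append, List.cons_append] at hchain
          have := (List.isChain_cons_cons.mp hchain).1
          omega
        · simp only [if_neg hgt]
          rw [ih (some (t.getLastD a))]
          simp only [Option.toList, List.flatMap_cons, hidx, List.singleton_append,
            List.nil_append]
          rw [hpres]
          have hshift := pvChainShift a t (List.flatMap (pvIdxs l1) rest) hch
          constructor
          · rintro ⟨hp, hchain⟩
            refine ⟨hp, ?_⟩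
            rw [List.cons_append, List.isChain_cons_cons]
            refine ⟨by omega, ?_⟩
            rw [← List.cons_append, hshift]
            exact hchain
          · rintro ⟨hp, hchain⟩
            refine ⟨hp, ?_⟩
            rw [List.cons_append, List.isChain_cons_cons, ← List.cons_append, hshift] at hchain
            exact hchain.2

theorem pvA_iff (l1 : List Int) (l2 : List Int) :
    verifica_esteira l1 l2 = true ↔
      ((∀ v ∈ l2, pvIdxs l1 v ≠ []) ∧
        List.IsChain (· ≤ ·) (l2.flatMap (pvIdxs l1))) := by
  unfold verifica_esteira
  rw [pvLoopA_eq]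
  by_cases h : ∀ v ∈ l2, pvIdxs l1 v ≠ []
  · have hb : (l2.all fun v => !(pvIdxs l1 v).isEmpty) = true := by
      simp only [List.all_eq_true, Bool.not_eq_eq_eq_not, Bool.not_true, List.isEmpty_eq_false_iff]
      exact h
    rw [hb]
    simp only [if_true, List.nil_append]
    cases ho : pvOrdemA (l2.flatMap (pvIdxs l1)) with
    | true => exact iff_of_true (by simp [ho]) ⟨h, (pvOrdemA_iff _).mp ho⟩
    | false =>
      apply iff_of_false (by simp [ho])
      rintro ⟨-, hch⟩
      rw [← pvOrdemA_iff] at hch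
      exact absurd hch (by simp [ho])
  · have hb : (l2.all fun v => !(pvIdxs l1 v).isEmpty) = false := by
      cases hb' : (l2.all fun v => !(pvIdxs l1 v).isEmpty)
      · rfl
      · exact absurd (by simpa using hb') h
    rw [hb]
    simp [h]

-- ===== VERDICT (by name: the statement is the Claim_ definition above) =====
theorem verifica_esteira_spec : Claim_equal_verifica_esteira := by
  intro l1 l2 _
  unfold Spec_verifica_esteira verifica_esteira_alt
  rw [Bool.eq_iff_iff, pvA_iff, pvScanB_iff]
  simp [Option.toList]
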